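-- pv_equiv track=rewrite | github.com/tnguye001/symbols | host/linux/agent/hashbuild.py | dynamic_sections_zeroes
-- ===== SOURCE A (Python) =====
-- def dynamic_sections_zeroes(dynamic_sections):
--     # dynamic_sections: [vaddr, psize, paddr, type]
--     zeroes = {}
--
--     for dynamic_section in dynamic_sections:
--         offset = 0
--         vaddr, psize, paddr, type, section_name = dynamic_section
--         while offset < psize:
--             reloc_addr = vaddr + offset
--             reloc_addr_base = reloc_addr - (reloc_addr % 0x1000)  # Virtual address of base of the page where reloc_addr exists
--             zeroes.setdefault(reloc_addr_base, []).append(reloc_addr - reloc_addr_base)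
--             offset += 4
--     return zeroes
-- ===== SOURCE B (Python) =====
-- def dynamic_sections_zeroes(dynamic_sections):
--     # page-by-page: one dict update per touched page instead of one per 4-byte word
--     zeroes = {}
--     for vaddr, psize, paddr, type, section_name in dynamic_sections:
--         end = vaddr + psize
--         addr = vaddr
--         while addr < end:
--             page_base = addr - addr % 0x1000
--             page_end = min(end, page_base + 0x1000)
--             zeroes.setdefault(page_base, []).extend(range(addr - page_base, page_end - page_base, 4))
--             addr += 4 * ((page_end - addr + 3) // 4)
--     return zeroes
-- ===== Notes on version B (the rewrite author's own statement) =====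
-- stated objective: faster
-- what changed: Instead of looping word-by-word (one dict setdefault/append per 4-byte offset), B walks page-by-page: one setdefault per touched page extended with the whole range of in-page offsets at once.
import Mathlib
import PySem

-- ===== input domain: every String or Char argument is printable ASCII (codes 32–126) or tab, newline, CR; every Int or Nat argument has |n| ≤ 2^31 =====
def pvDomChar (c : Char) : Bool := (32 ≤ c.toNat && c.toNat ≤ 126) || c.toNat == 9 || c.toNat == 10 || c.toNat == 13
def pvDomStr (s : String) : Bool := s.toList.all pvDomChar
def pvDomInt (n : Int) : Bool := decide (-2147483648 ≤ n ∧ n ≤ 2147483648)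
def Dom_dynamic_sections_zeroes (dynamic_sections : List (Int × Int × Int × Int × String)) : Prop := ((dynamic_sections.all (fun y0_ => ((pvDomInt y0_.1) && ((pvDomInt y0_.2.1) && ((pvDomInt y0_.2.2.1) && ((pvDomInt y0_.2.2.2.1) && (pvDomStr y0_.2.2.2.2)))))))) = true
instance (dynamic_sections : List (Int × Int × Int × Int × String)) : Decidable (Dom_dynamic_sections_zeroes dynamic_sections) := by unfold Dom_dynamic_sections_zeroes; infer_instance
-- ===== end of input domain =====

-- B buckets reloc offsets page-by-page (one dict update per touched page) instead of word-by-word; objective: faster (fewer iterations when psize spans many words).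

-- ===== PORT A =====
-- A's inner `while offset < psize` loop; `zeroes.setdefault(base, []).append(x)` is `modify base [] (· ++ [x])`.
def pvALoop (vaddr psize : Int) (offset : Int) (zeroes : PySem.Dict Int (List Int)) : PySem.Dict Int (List Int) :=
  if offset < psize then
    let reloc_addr := vaddr + offset
    let reloc_addr_base := reloc_addr - PySem.Int.mod reloc_addr 0x1000
    pvALoop vaddr psize (offset + 4)
      (zeroes.modify reloc_addr_base [] (fun l => l ++ [reloc_addr - reloc_addr_base]))
  else zeroes
termination_by (psize - offset).toNat
decreasing_by omega

def dynamic_sections_zeroes (dynamic_sections : List (Int × Int × Int × Int × String)) : List (Int × List Int) :=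
  (dynamic_sections.foldl
    (fun zeroes sec => pvALoop sec.1 sec.2.1 0 zeroes)
    PySem.Dict.empty).items

-- ===== PORT B =====
-- B's inner `while addr < end` loop (one iteration per touched page);
-- `zeroes.setdefault(base, []).extend(range(a, b, 4))` is `modify base [] (· ++ pyRange a b 4)`.
def pvBLoop (endv : Int) (addr : Int) (zeroes : PySem.Dict Int (List Int)) : PySem.Dict Int (List Int) :=
  if addr < endv then
    let page_base := addr - PySem.Int.mod addr 0x1000
    let page_end := min endv (page_base + 0x1000)
    pvBLoop endv (addr + 4 * (PySem.Int.floordiv (page_end - addr + 3) 4))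
      (zeroes.modify page_base [] (fun l => l ++ PySem.List.pyRange (addr - page_base) (page_end - page_base) 4))
  else zeroes
termination_by (endv - addr).toNat
decreasing_by
  have h1 := PySem.Int.mod_nonneg addr (b := 0x1000) (by norm_num)
  have h2 := PySem.Int.mod_lt addr (b := 0x1000) (by norm_num)
  rw [PySem.Int.floordiv_eq_ediv_of_pos (by norm_num)]
  omega

def dynamic_sections_zeroes_alt (dynamic_sections : List (Int × Int × Int × Int × String)) : List (Int × List Int) :=
  (dynamic_sections.foldl
    (fun zeroes sec => pvBLoop (sec.1 + sec.2.1) sec.1 zeroes)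
    PySem.Dict.empty).items

-- ===== PRECONDITION & SPEC =====
def Spec_dynamic_sections_zeroes (dynamic_sections : List (Int × Int × Int × Int × String)) (out : List (Int × List Int)) : Prop := out = dynamic_sections_zeroes_alt dynamic_sections
instance (dynamic_sections : List (Int × Int × Int × Int × String)) (out : List (Int × List Int)) : Decidable (Spec_dynamic_sections_zeroes dynamic_sections out) := by unfold Spec_dynamic_sections_zeroes; infer_instance

-- ===== CLAIM (what is proved, stated in full; the proofs are below) =====
def Claim_equal_dynamic_sections_zeroes : Prop := ∀ (dynamic_sections : List (Int × Int × Int × Int × String)), Dom_dynamic_sections_zeroes dynamic_sections → Spec_dynamic_sections_zeroes dynamic_sections (dynamic_sections_zeroes dynamic_sections)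

-- ===== LEMMAS AND PROOFS =====

-- A's word loop, re-addressed: iterating over reloc addresses instead of offsets.
def pvAddrLoop (endv : Int) (addr : Int) (zeroes : PySem.Dict Int (List Int)) : PySem.Dict Int (List Int) :=
  if addr < endv then
    let base := addr - PySem.Int.mod addr 0x1000
    pvAddrLoop endv (addr + 4) (zeroes.modify base [] (fun l => l ++ [addr - base]))
  else zeroes
termination_by (endv - addr).toNat
decreasing_by omega

theorem pvALoop_eq_addrLoop (vaddr psize : Int) : ∀ (offset : Int) (z : PySem.Dict Int (List Int)),
    pvALoop vaddr psize offset z = pvAddrLoop (vaddr + psize) (vaddr + offset) z := by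
  intro offset z
  by_cases h : offset < psize
  · rw [pvALoop, if_pos h, pvALoop_eq_addrLoop vaddr psize (offset + 4)]
    conv_rhs => rw [pvAddrLoop]
    rw [if_pos (show vaddr + offset < vaddr + psize by omega)]
    ring_nf
  · rw [pvALoop, if_neg h, pvAddrLoop, if_neg (show ¬ vaddr + offset < vaddr + psize by omega)]
termination_by offset => (psize - offset).toNat
decreasing_by omega

theorem pvModify_modify (z : PySem.Dict Int (List Int)) (k : Int) (f g : List Int → List Int) :
    (z.modify k [] f).modify k [] g = z.modify k [] (fun v => g (f v)) := by
  simp [PySem.Dict.modify, PySem.Dict.getD_insert_self, PySem.Dict.insert_insert_self]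

theorem pvRange4_cons (a b : Int) (h : a < b) :
    PySem.List.pyRange a b 4 = a :: PySem.List.pyRange (a + 4) b 4 := by
  rw [PySem.List.pyRange_of_pos _ _ (by norm_num), PySem.List.pyRange_of_pos _ _ (by norm_num)]
  by_cases h4 : a + 4 < b
  · have hn : ((b - a + 4 - 1) / 4).toNat = ((b - (a + 4) + 4 - 1) / 4).toNat + 1 := by omega
    simp only [if_pos h, if_pos h4, hn, List.range_succ_eq_map, List.map_cons, List.map_map]
    congr 1
    · norm_num
    · apply List.map_congr_left
      intro k _
      simp only [Function.comp_apply, Nat.succ_eq_add_one]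
      push_cast
      ring
  · have hn : ((b - a + 4 - 1) / 4).toNat = 1 := by omega
    simp [if_pos h, if_neg h4, hn]

-- One page of A's word loop equals one batched update, then the loop resumes at B's next address.
theorem pvAddrLoop_page (endv pend : Int) : ∀ (addr : Int) (z : PySem.Dict Int (List Int))
    (base : Int), base = addr - PySem.Int.mod addr 0x1000 → addr < pend → pend ≤ base + 0x1000 →
    pend ≤ endv →
    pvAddrLoop endv addr z =
      pvAddrLoop endv (addr + 4 * (PySem.Int.floordiv (pend - addr + 3) 4))
        (z.modify base [] (fun l => l ++ PySem.List.pyRange (addr - base) (pend - base) 4)) := by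
  intro addr z base hbase hlt hpage hpe
  have h1 := PySem.Int.mod_nonneg addr (b := 0x1000) (by norm_num)
  have h2 := PySem.Int.mod_lt addr (b := 0x1000) (by norm_num)
  have hmod := PySem.Int.mod_eq_emod_of_pos (a := addr) (b := 0x1000) (by norm_num)
  rw [PySem.Int.floordiv_eq_ediv_of_pos (by norm_num)]
  rw [pvAddrLoop, if_pos (by omega)]
  by_cases hlast : pend ≤ addr + 4
  · -- last word of the page
    have hq : addr + 4 * ((pend - addr + 3) / 4) = addr + 4 := by omega
    have hrange : PySem.List.pyRange (addr - base) (pend - base) 4 = [addr - base] := by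
      rw [pvRange4_cons _ _ (by omega), PySem.List.pyRange_of_pos _ _ (by norm_num),
        if_neg (by omega)]
      simp
    rw [hq, hrange, ← hbase]
  · -- peel the first word, recurse within the page
    have hmod4 : PySem.Int.mod (addr + 4) 0x1000 = PySem.Int.mod addr 0x1000 + 4 := by
      rw [PySem.Int.mod_eq_emod_of_pos (by norm_num), hmod]
      omega
    have ih := pvAddrLoop_page endv pend (addr + 4)
      (z.modify base [] (fun l => l ++ [addr - base])) base (by rw [hmod4]; omega)
      (by omega) hpage hpe
    rw [PySem.Int.floordiv_eq_ediv_of_pos (by norm_num)] at ih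
    rw [← hbase, ih, pvModify_modify]
    have hq : addr + 4 + 4 * ((pend - (addr + 4) + 3) / 4) = addr + 4 * ((pend - addr + 3) / 4) := by
      omega
    rw [hq, pvRange4_cons (addr - base) (pend - base) (by omega)]
    have : addr - base + 4 = addr + 4 - base := by ring
    rw [this]
    simp
termination_by addr => (pend - addr).toNat
decreasing_by omega

theorem pvAddrLoop_eq_bLoop (endv : Int) : ∀ (addr : Int) (z : PySem.Dict Int (List Int)),
    pvAddrLoop endv addr z = pvBLoop endv addr z := by
  intro addr z
  rw [pvBLoop]
  split
  · rename_i hlt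
    have h1 := PySem.Int.mod_nonneg addr (b := 0x1000) (by norm_num)
    have h2 := PySem.Int.mod_lt addr (b := 0x1000) (by norm_num)
    rw [pvAddrLoop_page endv (min endv (addr - PySem.Int.mod addr 0x1000 + 0x1000)) addr z
      (addr - PySem.Int.mod addr 0x1000) rfl (by omega) (by omega) (by omega)]
    rw [pvAddrLoop_eq_bLoop]
  · rw [pvAddrLoop, if_neg (by assumption)]
termination_by addr => (endv - addr).toNat
decreasing_by
  have h1 := PySem.Int.mod_nonneg addr (b := 0x1000) (by norm_num)
  have h2 := PySem.Int.mod_lt addr (b := 0x1000) (by norm_num)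
  rw [PySem.Int.floordiv_eq_ediv_of_pos (by norm_num)]
  omega

-- ===== VERDICT (by name: the statement is the Claim_ definition above) =====
theorem dynamic_sections_zeroes_spec : Claim_equal_dynamic_sections_zeroes := by
  intro ds _
  show dynamic_sections_zeroes ds = dynamic_sections_zeroes_alt ds
  unfold dynamic_sections_zeroes dynamic_sections_zeroes_alt
  congr 1
  have hstep : (fun (zeroes : PySem.Dict Int (List Int)) (sec : Int × Int × Int × Int × String) =>
      pvALoop sec.1 sec.2.1 0 zeroes) =
      (fun zeroes sec => pvBLoop (sec.1 + sec.2.1) sec.1 zeroes) := by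
    funext z sec
    rw [pvALoop_eq_addrLoop, pvAddrLoop_eq_bLoop, add_zero]
  rw [hstep]
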